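-- pv_equiv track=rewrite | github.com/Alfred252525/Analytical-Fire | scripts/fetch_real_problems.py | _so_category
-- ===== SOURCE A (Python) =====
-- from typing import Any, Dict, List, Optional
--
-- def _so_category(tags: List[str]) -> str:
--     tag_set = set(t.lower() for t in tags)
--     if tag_set & {"docker", "kubernetes", "aws", "devops", "terraform"}:
--         return "devops"
--     if tag_set & {"security", "authentication", "jwt", "oauth2"}:
--         return "security"
--     if tag_set & {"postgresql", "mysql", "sql", "mongodb", "database", "redis"}:
--         return "database"
--     if tag_set & {"fastapi", "django", "flask", "express", "api", "rest"}:
--         return "api"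
--     if tag_set & {"react", "vue", "angular", "css", "html"}:
--         return "frontend"
--     if tag_set & {"python"}:
--         return "python"
--     if tag_set & {"javascript", "typescript", "node.js"}:
--         return "javascript"
--     if tag_set & {"go", "golang"}:
--         return "golang"
--     if tag_set & {"rust"}:
--         return "rust"
--     return "general"
-- ===== SOURCE B (Python) =====
-- _CATEGORIES = ["devops", "security", "database", "api", "frontend",
--                "python", "javascript", "golang", "rust"]
-- _KEYWORDS = [
--     ["docker", "kubernetes", "aws", "devops", "terraform"],
--     ["security", "authentication", "jwt", "oauth2"],
--     ["postgresql", "mysql", "sql", "mongodb", "database", "redis"],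
--     ["fastapi", "django", "flask", "express", "api", "rest"],
--     ["react", "vue", "angular", "css", "html"],
--     ["python"],
--     ["javascript", "typescript", "node.js"],
--     ["go", "golang"],
--     ["rust"],
-- ]
-- _RANK = {kw: i for i, kws in enumerate(_KEYWORDS) for kw in kws}
--
--
-- def _so_category(tags):
--     best = len(_CATEGORIES)
--     for t in tags:
--         r = _RANK.get(t.lower(), len(_CATEGORIES))
--         if r < best:
--             best = r
--     return _CATEGORIES[best] if best < len(_CATEGORIES) else "general"
-- ===== Notes on version B (the rewrite author's own statement) =====
-- stated objective: idiomatic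
-- what changed: Replaces the nine ordered set-intersection branches by one precomputed keyword-to-priority-rank dict and a single min-rank pass over the tags, translating the minimum rank back to its category name.
import Mathlib
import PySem

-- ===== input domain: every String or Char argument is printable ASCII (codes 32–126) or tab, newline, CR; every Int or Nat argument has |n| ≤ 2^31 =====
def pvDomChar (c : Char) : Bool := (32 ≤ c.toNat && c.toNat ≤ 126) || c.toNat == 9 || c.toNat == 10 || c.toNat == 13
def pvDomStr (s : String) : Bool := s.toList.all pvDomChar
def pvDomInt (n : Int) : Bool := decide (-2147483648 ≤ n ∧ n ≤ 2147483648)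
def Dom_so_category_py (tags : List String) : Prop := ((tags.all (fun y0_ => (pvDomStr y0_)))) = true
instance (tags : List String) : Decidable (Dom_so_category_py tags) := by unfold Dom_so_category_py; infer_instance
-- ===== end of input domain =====

-- B replaces A's nine ordered set-intersection tests by a precomputed keyword→rank dict and
-- a single min-rank pass over the tags (idiomatic; same observable behaviour, no mutation).

-- ===== PORT A =====
def so_category_py (tags : List String) : String :=
  let tagSet : PySem.Set String := PySem.Set.ofList (tags.map PySem.Str.lower)
  if PySem.Set.inter tagSet ["docker", "kubernetes", "aws", "devops", "terraform"] ≠ [] then "devops"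
  else if PySem.Set.inter tagSet ["security", "authentication", "jwt", "oauth2"] ≠ [] then "security"
  else if PySem.Set.inter tagSet ["postgresql", "mysql", "sql", "mongodb", "database", "redis"] ≠ [] then "database"
  else if PySem.Set.inter tagSet ["fastapi", "django", "flask", "express", "api", "rest"] ≠ [] then "api"
  else if PySem.Set.inter tagSet ["react", "vue", "angular", "css", "html"] ≠ [] then "frontend"
  else if PySem.Set.inter tagSet ["python"] ≠ [] then "python"
  else if PySem.Set.inter tagSet ["javascript", "typescript", "node.js"] ≠ [] then "javascript"
  else if PySem.Set.inter tagSet ["go", "golang"] ≠ [] then "golang"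
  else if PySem.Set.inter tagSet ["rust"] ≠ [] then "rust"
  else "general"

-- ===== PORT B =====
-- the dict _RANK from Source B, written out (its keys are pairwise distinct)
def pvKwRank : PySem.Dict String Int :=
  PySem.Dict.mk
  [("docker", 0), ("kubernetes", 0), ("aws", 0), ("devops", 0), ("terraform", 0),
   ("security", 1), ("authentication", 1), ("jwt", 1), ("oauth2", 1),
   ("postgresql", 2), ("mysql", 2), ("sql", 2), ("mongodb", 2), ("database", 2), ("redis", 2),
   ("fastapi", 3), ("django", 3), ("flask", 3), ("express", 3), ("api", 3), ("rest", 3),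
   ("react", 4), ("vue", 4), ("angular", 4), ("css", 4), ("html", 4),
   ("python", 5),
   ("javascript", 6), ("typescript", 6), ("node.js", 6),
   ("go", 7), ("golang", 7),
   ("rust", 8)]

def pvCategories : List String :=
  ["devops", "security", "database", "api", "frontend", "python", "javascript", "golang", "rust"]

def so_category_py_alt (tags : List String) : String :=
  let best := tags.foldl (fun best t =>
    let r := PySem.Dict.getD pvKwRank (PySem.Str.lower t) 9
    if r < best then r else best) 9
  if best < 9 then (PySem.List.pyGet? pvCategories best).getD "general" else "general"

-- ===== PRECONDITION & SPEC =====
def Spec_so_category_py (tags : List String) (out : String) : Prop := out = so_category_py_alt tags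
instance (tags : List String) (out : String) : Decidable (Spec_so_category_py tags out) := by unfold Spec_so_category_py; infer_instance

-- ===== CLAIM (what is proved, stated in full; the proofs are below) =====
def Claim_equal_so_category_py : Prop := ∀ (tags : List String), Dom_so_category_py tags → Spec_so_category_py tags (so_category_py tags)

-- ===== LEMMAS AND PROOFS =====

-- keyword list of category i (the sets of A, the rows of Source B's _KEYWORDS)
def pvKws : Nat → List String
  | 0 => ["docker", "kubernetes", "aws", "devops", "terraform"]
  | 1 => ["security", "authentication", "jwt", "oauth2"]
  | 2 => ["postgresql", "mysql", "sql", "mongodb", "database", "redis"]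
  | 3 => ["fastapi", "django", "flask", "express", "api", "rest"]
  | 4 => ["react", "vue", "angular", "css", "html"]
  | 5 => ["python"]
  | 6 => ["javascript", "typescript", "node.js"]
  | 7 => ["go", "golang"]
  | 8 => ["rust"]
  | _ => []

-- does some tag (lowercased) hit category i?
def pvM (tags : List String) (i : Nat) : Bool :=
  tags.any (fun t => decide (PySem.Str.lower t ∈ pvKws i))

-- the rank chain: first category hit, 9 if none
def pvBest (tags : List String) : Int :=
  if pvM tags 0 then 0 else if pvM tags 1 then 1 else if pvM tags 2 then 2
  else if pvM tags 3 then 3 else if pvM tags 4 then 4 else if pvM tags 5 then 5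
  else if pvM tags 6 then 6 else if pvM tags 7 then 7 else if pvM tags 8 then 8 else 9

def pvCat (k : Int) : String :=
  if k = 0 then "devops" else if k = 1 then "security" else if k = 2 then "database"
  else if k = 3 then "api" else if k = 4 then "frontend" else if k = 5 then "python"
  else if k = 6 then "javascript" else if k = 7 then "golang" else if k = 8 then "rust"
  else "general"

-- a single-string rank: what the dict lookup computes, as a membership chain
def pvRank (s : String) : Int :=
  if s ∈ pvKws 0 then 0 else if s ∈ pvKws 1 then 1 else if s ∈ pvKws 2 then 2
  else if s ∈ pvKws 3 then 3 else if s ∈ pvKws 4 then 4 else if s ∈ pvKws 5 then 5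
  else if s ∈ pvKws 6 then 6 else if s ∈ pvKws 7 then 7 else if s ∈ pvKws 8 then 8 else 9

theorem pvRank_eq (s : String) : PySem.Dict.getD pvKwRank s 9 = pvRank s := by
  by_cases h0 : s = "docker"
  · subst h0; decide
  by_cases h1 : s = "kubernetes"
  · subst h1; decide
  by_cases h2 : s = "aws"
  · subst h2; decide
  by_cases h3 : s = "devops"
  · subst h3; decide
  by_cases h4 : s = "terraform"
  · subst h4; decide
  by_cases h5 : s = "security"
  · subst h5; decide
  by_cases h6 : s = "authentication"
  · subst h6; decide
  by_cases h7 : s = "jwt"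
  · subst h7; decide
  by_cases h8 : s = "oauth2"
  · subst h8; decide
  by_cases h9 : s = "postgresql"
  · subst h9; decide
  by_cases h10 : s = "mysql"
  · subst h10; decide
  by_cases h11 : s = "sql"
  · subst h11; decide
  by_cases h12 : s = "mongodb"
  · subst h12; decide
  by_cases h13 : s = "database"
  · subst h13; decide
  by_cases h14 : s = "redis"
  · subst h14; decide
  by_cases h15 : s = "fastapi"
  · subst h15; decide
  by_cases h16 : s = "django"
  · subst h16; decide
  by_cases h17 : s = "flask"
  · subst h17; decide
  by_cases h18 : s = "express"
  · subst h18; decide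
  by_cases h19 : s = "api"
  · subst h19; decide
  by_cases h20 : s = "rest"
  · subst h20; decide
  by_cases h21 : s = "react"
  · subst h21; decide
  by_cases h22 : s = "vue"
  · subst h22; decide
  by_cases h23 : s = "angular"
  · subst h23; decide
  by_cases h24 : s = "css"
  · subst h24; decide
  by_cases h25 : s = "html"
  · subst h25; decide
  by_cases h26 : s = "python"
  · subst h26; decide
  by_cases h27 : s = "javascript"
  · subst h27; decide
  by_cases h28 : s = "typescript"
  · subst h28; decide
  by_cases h29 : s = "node.js"
  · subst h29; decide
  by_cases h30 : s = "go"
  · subst h30; decide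
  by_cases h31 : s = "golang"
  · subst h31; decide
  by_cases h32 : s = "rust"
  · subst h32; decide
  · simp [pvRank, pvKws, pvKwRank, PySem.Dict.getD_eq_get?_getD, PySem.Dict.get?, h0, h1, h2, h3, h4, h5, h6, h7, h8, h9, h10, h11, h12, h13, h14, h15, h16, h17, h18, h19, h20, h21, h22, h23, h24, h25, h26, h27, h28, h29, h30, h31, h32, Ne.symm h0, Ne.symm h1, Ne.symm h2, Ne.symm h3, Ne.symm h4, Ne.symm h5, Ne.symm h6, Ne.symm h7, Ne.symm h8, Ne.symm h9, Ne.symm h10, Ne.symm h11, Ne.symm h12, Ne.symm h13, Ne.symm h14, Ne.symm h15, Ne.symm h16, Ne.symm h17, Ne.symm h18, Ne.symm h19, Ne.symm h20, Ne.symm h21, Ne.symm h22, Ne.symm h23, Ne.symm h24, Ne.symm h25, Ne.symm h26, Ne.symm h27, Ne.symm h28, Ne.symm h29, Ne.symm h30, Ne.symm h31, Ne.symm h32]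

theorem pv_inter_ne_iff (tags : List String) (i : Nat) :
    (PySem.Set.inter (PySem.Set.ofList (tags.map PySem.Str.lower)) (pvKws i) ≠ []) ↔ pvM tags i = true := by
  rw [Ne, List.eq_nil_iff_forall_not_mem]
  push Not
  simp only [pvM, List.any_eq_true, decide_eq_true_eq, PySem.Set.mem_inter,
    PySem.Set.mem_ofList, List.mem_map]
  constructor
  · rintro ⟨x, ⟨t, ht, rfl⟩, hk⟩; exact ⟨t, ht, hk⟩
  · rintro ⟨t, ht, hk⟩; exact ⟨_, ⟨t, ht, rfl⟩, hk⟩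

theorem pvBest_nonneg (tags : List String) : 0 ≤ pvBest tags := by
  unfold pvBest; split_ifs <;> omega

theorem pvBest_le (tags : List String) : pvBest tags ≤ 9 := by
  unfold pvBest; split_ifs <;> omega

theorem pvBest_nil : pvBest [] = 9 := by decide

set_option maxHeartbeats 4000000 in
theorem pvBest_cons (t : String) (ts : List String) :
    pvBest (t :: ts) = min (pvRank (PySem.Str.lower t)) (pvBest ts) := by
  by_cases k0 : PySem.Str.lower t ∈ pvKws 0
  ·
    have hi : pvM (t :: ts) 0 = true := by simp [pvM, k0]
    have hr : pvRank (PySem.Str.lower t) = 0 := by simp [pvRank, k0]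
    simp only [pvBest, hi, hr]
    split_ifs <;> omega
  by_cases k1 : PySem.Str.lower t ∈ pvKws 1
  ·
    have h0 : pvM (t :: ts) 0 = pvM ts 0 := by simp [pvM, k0]
    have hi : pvM (t :: ts) 1 = true := by simp [pvM, k1]
    have hr : pvRank (PySem.Str.lower t) = 1 := by simp [pvRank, k0, k1]
    simp only [pvBest, h0, hi, hr]
    split_ifs <;> omega
  by_cases k2 : PySem.Str.lower t ∈ pvKws 2
  ·
    have h0 : pvM (t :: ts) 0 = pvM ts 0 := by simp [pvM, k0]
    have h1 : pvM (t :: ts) 1 = pvM ts 1 := by simp [pvM, k1]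
    have hi : pvM (t :: ts) 2 = true := by simp [pvM, k2]
    have hr : pvRank (PySem.Str.lower t) = 2 := by simp [pvRank, k0, k1, k2]
    simp only [pvBest, h0, h1, hi, hr]
    split_ifs <;> omega
  by_cases k3 : PySem.Str.lower t ∈ pvKws 3
  ·
    have h0 : pvM (t :: ts) 0 = pvM ts 0 := by simp [pvM, k0]
    have h1 : pvM (t :: ts) 1 = pvM ts 1 := by simp [pvM, k1]
    have h2 : pvM (t :: ts) 2 = pvM ts 2 := by simp [pvM, k2]
    have hi : pvM (t :: ts) 3 = true := by simp [pvM, k3]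
    have hr : pvRank (PySem.Str.lower t) = 3 := by simp [pvRank, k0, k1, k2, k3]
    simp only [pvBest, h0, h1, h2, hi, hr]
    split_ifs <;> omega
  by_cases k4 : PySem.Str.lower t ∈ pvKws 4
  ·
    have h0 : pvM (t :: ts) 0 = pvM ts 0 := by simp [pvM, k0]
    have h1 : pvM (t :: ts) 1 = pvM ts 1 := by simp [pvM, k1]
    have h2 : pvM (t :: ts) 2 = pvM ts 2 := by simp [pvM, k2]
    have h3 : pvM (t :: ts) 3 = pvM ts 3 := by simp [pvM, k3]
    have hi : pvM (t :: ts) 4 = true := by simp [pvM, k4]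
    have hr : pvRank (PySem.Str.lower t) = 4 := by simp [pvRank, k0, k1, k2, k3, k4]
    simp only [pvBest, h0, h1, h2, h3, hi, hr]
    split_ifs <;> omega
  by_cases k5 : PySem.Str.lower t ∈ pvKws 5
  ·
    have h0 : pvM (t :: ts) 0 = pvM ts 0 := by simp [pvM, k0]
    have h1 : pvM (t :: ts) 1 = pvM ts 1 := by simp [pvM, k1]
    have h2 : pvM (t :: ts) 2 = pvM ts 2 := by simp [pvM, k2]
    have h3 : pvM (t :: ts) 3 = pvM ts 3 := by simp [pvM, k3]
    have h4 : pvM (t :: ts) 4 = pvM ts 4 := by simp [pvM, k4]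
    have hi : pvM (t :: ts) 5 = true := by simp [pvM, k5]
    have hr : pvRank (PySem.Str.lower t) = 5 := by simp [pvRank, k0, k1, k2, k3, k4, k5]
    simp only [pvBest, h0, h1, h2, h3, h4, hi, hr]
    split_ifs <;> omega
  by_cases k6 : PySem.Str.lower t ∈ pvKws 6
  ·
    have h0 : pvM (t :: ts) 0 = pvM ts 0 := by simp [pvM, k0]
    have h1 : pvM (t :: ts) 1 = pvM ts 1 := by simp [pvM, k1]
    have h2 : pvM (t :: ts) 2 = pvM ts 2 := by simp [pvM, k2]
    have h3 : pvM (t :: ts) 3 = pvM ts 3 := by simp [pvM, k3]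
    have h4 : pvM (t :: ts) 4 = pvM ts 4 := by simp [pvM, k4]
    have h5 : pvM (t :: ts) 5 = pvM ts 5 := by simp [pvM, k5]
    have hi : pvM (t :: ts) 6 = true := by simp [pvM, k6]
    have hr : pvRank (PySem.Str.lower t) = 6 := by simp [pvRank, k0, k1, k2, k3, k4, k5, k6]
    simp only [pvBest, h0, h1, h2, h3, h4, h5, hi, hr]
    split_ifs <;> omega
  by_cases k7 : PySem.Str.lower t ∈ pvKws 7
  ·
    have h0 : pvM (t :: ts) 0 = pvM ts 0 := by simp [pvM, k0]
    have h1 : pvM (t :: ts) 1 = pvM ts 1 := by simp [pvM, k1]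
    have h2 : pvM (t :: ts) 2 = pvM ts 2 := by simp [pvM, k2]
    have h3 : pvM (t :: ts) 3 = pvM ts 3 := by simp [pvM, k3]
    have h4 : pvM (t :: ts) 4 = pvM ts 4 := by simp [pvM, k4]
    have h5 : pvM (t :: ts) 5 = pvM ts 5 := by simp [pvM, k5]
    have h6 : pvM (t :: ts) 6 = pvM ts 6 := by simp [pvM, k6]
    have hi : pvM (t :: ts) 7 = true := by simp [pvM, k7]
    have hr : pvRank (PySem.Str.lower t) = 7 := by simp [pvRank, k0, k1, k2, k3, k4, k5, k6, k7]
    simp only [pvBest, h0, h1, h2, h3, h4, h5, h6, hi, hr]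
    split_ifs <;> omega
  by_cases k8 : PySem.Str.lower t ∈ pvKws 8
  ·
    have h0 : pvM (t :: ts) 0 = pvM ts 0 := by simp [pvM, k0]
    have h1 : pvM (t :: ts) 1 = pvM ts 1 := by simp [pvM, k1]
    have h2 : pvM (t :: ts) 2 = pvM ts 2 := by simp [pvM, k2]
    have h3 : pvM (t :: ts) 3 = pvM ts 3 := by simp [pvM, k3]
    have h4 : pvM (t :: ts) 4 = pvM ts 4 := by simp [pvM, k4]
    have h5 : pvM (t :: ts) 5 = pvM ts 5 := by simp [pvM, k5]
    have h6 : pvM (t :: ts) 6 = pvM ts 6 := by simp [pvM, k6]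
    have h7 : pvM (t :: ts) 7 = pvM ts 7 := by simp [pvM, k7]
    have hi : pvM (t :: ts) 8 = true := by simp [pvM, k8]
    have hr : pvRank (PySem.Str.lower t) = 8 := by simp [pvRank, k0, k1, k2, k3, k4, k5, k6, k7, k8]
    simp only [pvBest, h0, h1, h2, h3, h4, h5, h6, h7, hi, hr]
    split_ifs <;> omega
  have h0 : pvM (t :: ts) 0 = pvM ts 0 := by simp [pvM, k0]
  have h1 : pvM (t :: ts) 1 = pvM ts 1 := by simp [pvM, k1]
  have h2 : pvM (t :: ts) 2 = pvM ts 2 := by simp [pvM, k2]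
  have h3 : pvM (t :: ts) 3 = pvM ts 3 := by simp [pvM, k3]
  have h4 : pvM (t :: ts) 4 = pvM ts 4 := by simp [pvM, k4]
  have h5 : pvM (t :: ts) 5 = pvM ts 5 := by simp [pvM, k5]
  have h6 : pvM (t :: ts) 6 = pvM ts 6 := by simp [pvM, k6]
  have h7 : pvM (t :: ts) 7 = pvM ts 7 := by simp [pvM, k7]
  have h8 : pvM (t :: ts) 8 = pvM ts 8 := by simp [pvM, k8]
  have hr : pvRank (PySem.Str.lower t) = 9 := by simp [pvRank, k0, k1, k2, k3, k4, k5, k6, k7, k8]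
  simp only [pvBest, h0, h1, h2, h3, h4, h5, h6, h7, h8, hr]
  split_ifs <;> omega

set_option maxHeartbeats 4000000 in
theorem pvA_eq (tags : List String) : so_category_py tags = pvCat (pvBest tags) := by
  have h0 := pv_inter_ne_iff tags 0
  have h1 := pv_inter_ne_iff tags 1
  have h2 := pv_inter_ne_iff tags 2
  have h3 := pv_inter_ne_iff tags 3
  have h4 := pv_inter_ne_iff tags 4
  have h5 := pv_inter_ne_iff tags 5
  have h6 := pv_inter_ne_iff tags 6
  have h7 := pv_inter_ne_iff tags 7
  have h8 := pv_inter_ne_iff tags 8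
  simp only [pvKws] at h0 h1 h2 h3 h4 h5 h6 h7 h8
  simp only [so_category_py, h0, h1, h2, h3, h4, h5, h6, h7, h8]
  by_cases m0 : pvM tags 0 = true
  · simp [pvBest, pvCat, m0]
  by_cases m1 : pvM tags 1 = true
  · simp [pvBest, pvCat, m0, m1]
  by_cases m2 : pvM tags 2 = true
  · simp [pvBest, pvCat, m0, m1, m2]
  by_cases m3 : pvM tags 3 = true
  · simp [pvBest, pvCat, m0, m1, m2, m3]
  by_cases m4 : pvM tags 4 = true
  · simp [pvBest, pvCat, m0, m1, m2, m3, m4]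
  by_cases m5 : pvM tags 5 = true
  · simp [pvBest, pvCat, m0, m1, m2, m3, m4, m5]
  by_cases m6 : pvM tags 6 = true
  · simp [pvBest, pvCat, m0, m1, m2, m3, m4, m5, m6]
  by_cases m7 : pvM tags 7 = true
  · simp [pvBest, pvCat, m0, m1, m2, m3, m4, m5, m6, m7]
  by_cases m8 : pvM tags 8 = true
  · simp [pvBest, pvCat, m0, m1, m2, m3, m4, m5, m6, m7, m8]
  simp [pvBest, pvCat, m0, m1, m2, m3, m4, m5, m6, m7, m8]

theorem pv_fold_eq (tags : List String) : ∀ b : Int, b ≤ 9 →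
    tags.foldl (fun best t =>
      let r := PySem.Dict.getD pvKwRank (PySem.Str.lower t) 9
      if r < best then r else best) b = min b (pvBest tags) := by
  induction tags with
  | nil =>
    intro b hb
    rw [List.foldl_nil, pvBest_nil, min_eq_left hb]
  | cons t ts ih =>
    intro b hb
    rw [List.foldl_cons]
    show List.foldl _ (if PySem.Dict.getD pvKwRank (PySem.Str.lower t) 9 < b then _ else b) ts = _
    rw [pvRank_eq]
    have h1 : (if pvRank (PySem.Str.lower t) < b then pvRank (PySem.Str.lower t) else b)
        = min b (pvRank (PySem.Str.lower t)) := by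
      rw [min_def]; split_ifs <;> omega
    rw [h1, ih _ (le_trans (min_le_left _ _) hb), pvBest_cons, min_assoc]

theorem pvB_eq (tags : List String) : so_category_py_alt tags = pvCat (pvBest tags) := by
  show (if (tags.foldl _ 9) < 9 then _ else _) = _
  rw [pv_fold_eq tags 9 le_rfl, min_eq_right (pvBest_le tags)]
  have hlo := pvBest_nonneg tags
  have hhi := pvBest_le tags
  set k := pvBest tags with hk
  clear_value k
  interval_cases k <;> rfl

-- ===== VERDICT (by name: the statement is the Claim_ definition above) =====
theorem so_category_py_spec : Claim_equal_so_category_py := by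
  intro tags _
  unfold Spec_so_category_py
  rw [pvA_eq, pvB_eq]
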